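-- pv_equiv track=rewrite | github.com/guibor/cursearch | cursearch.py | _find_best_message_match
-- ===== SOURCE A (Python) =====
-- def _find_best_message_match(messages, tokens):
--     """Find the last message containing the most query tokens.
--
--     Prefers messages where all tokens appear; falls back to the message
--     with the highest token count. Returns -1 if no token matches at all.
--     """
--     if not tokens:
--         return -1
--     lower_tokens = [t.lower() for t in tokens]
--     best_idx = -1
--     best_count = 0
--     for i, (_, text) in enumerate(messages):
--         lower_text = text.lower()
--         count = sum(1 for lt in lower_tokens if lt in lower_text)
--         if count > 0 and count >= best_count:
--             best_count = count
--             best_idx = i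
--     return best_idx
-- ===== SOURCE B (Python) =====
-- def _find_best_message_match(messages, tokens):
--     """Find the last message containing the most query tokens.
--
--     Scans backwards with a strict comparison (so the first maximum seen is
--     the last one overall) and returns immediately on a message containing
--     every token, since no earlier message can beat or tie it from behind.
--     """
--     if not tokens:
--         return -1
--     lows = [t.lower() for t in tokens]
--     full = len(lows)
--     best_idx = -1
--     best_count = 0
--     for i, (_, text) in reversed(list(enumerate(messages))):
--         lower_text = text.lower()
--         count = 0
--         for lt in lows:
--             if lt in lower_text:
--                 count += 1
--         if count == full:
--             return i
--         if count > best_count: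
--             best_count = count
--             best_idx = i
--     return best_idx
-- ===== Notes on version B (the rewrite author's own statement) =====
-- stated objective: alternative
-- what changed: B scans the messages in reverse with a strict comparison (the first maximum seen in reverse is A's last maximum) and returns early as soon as a message contains every token, instead of A's forward loop with a weak >= tie-break.
import Mathlib
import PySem

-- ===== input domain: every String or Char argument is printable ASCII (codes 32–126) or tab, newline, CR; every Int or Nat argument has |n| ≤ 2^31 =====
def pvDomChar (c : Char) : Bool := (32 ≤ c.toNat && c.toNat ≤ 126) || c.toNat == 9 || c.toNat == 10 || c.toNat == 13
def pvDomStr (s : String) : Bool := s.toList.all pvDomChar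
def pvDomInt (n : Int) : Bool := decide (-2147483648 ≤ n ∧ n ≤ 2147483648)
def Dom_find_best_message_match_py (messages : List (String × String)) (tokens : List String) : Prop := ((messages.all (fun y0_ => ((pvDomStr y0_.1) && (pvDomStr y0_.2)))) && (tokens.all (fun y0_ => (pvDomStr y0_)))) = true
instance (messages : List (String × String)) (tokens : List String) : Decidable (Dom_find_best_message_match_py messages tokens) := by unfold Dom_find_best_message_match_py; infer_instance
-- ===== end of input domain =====

-- B replaces A's forward loop (weak >= tie-break) by a reverse scan with a strict comparison and an
-- early return on a message containing every token (objective: alternative traversal, same cost).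

-- ===== PORT A =====
def find_best_message_match_py (messages : List (String × String)) (tokens : List String) : Int :=
  if tokens = [] then -1
  else
    let lower_tokens := tokens.map PySem.Str.lower
    let res := (PySem.List.enumerate messages).foldl
      (fun (st : Int × Int) (p : Int × (String × String)) =>
        let lower_text := PySem.Str.lower p.2.2
        let count : Int := lower_tokens.foldl
          (fun acc lt => if PySem.Str.isIn lt lower_text then acc + 1 else acc) 0
        if count > 0 ∧ count ≥ st.2 then (p.1, count) else st)
      (-1, 0)
    res.1

-- ===== PORT B =====
-- reversed(list(enumerate(messages))) is (enumerate messages).reverse; the early 'return i'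
-- makes the loop a recursion over the remaining items with state (best_idx, best_count).
def pvBLoop (lows : List String) (full : Int) :
    List (Int × (String × String)) → Int × Int → Int
  | [], st => st.1
  | p :: rest, st =>
    let lower_text := PySem.Str.lower p.2.2
    let count : Int := lows.foldl
      (fun acc lt => if PySem.Str.isIn lt lower_text then acc + 1 else acc) 0
    if count = full then p.1
    else if count > st.2 then pvBLoop lows full rest (p.1, count)
    else pvBLoop lows full rest st

def find_best_message_match_py_alt (messages : List (String × String)) (tokens : List String) : Int :=
  if tokens = [] then -1
  else
    let lows := tokens.map PySem.Str.lower
    pvBLoop lows (lows.length : Int) (PySem.List.enumerate messages).reverse (-1, 0)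

-- ===== PRECONDITION & SPEC =====
def Spec_find_best_message_match_py (messages : List (String × String)) (tokens : List String) (out : Int) : Prop := out = find_best_message_match_py_alt messages tokens
instance (messages : List (String × String)) (tokens : List String) (out : Int) : Decidable (Spec_find_best_message_match_py messages tokens out) := by unfold Spec_find_best_message_match_py; infer_instance

-- ===== CLAIM (what is proved, stated in full; the proofs are below) =====
def Claim_equal_find_best_message_match_py : Prop := ∀ (messages : List (String × String)) (tokens : List String), Dom_find_best_message_match_py messages tokens → Spec_find_best_message_match_py messages tokens (find_best_message_match_py messages tokens)

-- ===== LEMMAS AND PROOFS =====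

-- count of one message, as both ports compute it
def pvCount (lows : List String) (m : String × String) : Int :=
  lows.foldl (fun acc lt => if PySem.Str.isIn lt (PySem.Str.lower m.2) then acc + 1 else acc) 0

-- A's loop, abstracted to the counts list
def pvL (cs : List Int) : Int × Int :=
  (PySem.List.enumerate cs).foldl
    (fun (st : Int × Int) (q : Int × Int) => if q.2 > 0 ∧ q.2 ≥ st.2 then (q.1, q.2) else st)
    (-1, 0)

-- B's loop, abstracted to (index, count) pairs, with the early exit
def pvBRec (full : Int) : List (Int × Int) → Int × Int → Int
  | [], st => st.1
  | q :: rest, st =>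
    if q.2 = full then q.1
    else if q.2 > st.2 then pvBRec full rest q
    else pvBRec full rest st

-- the same loop without the early exit
def pvSRec : List (Int × Int) → Int × Int → Int
  | [], st => st.1
  | q :: rest, st => if q.2 > st.2 then pvSRec rest q else pvSRec rest st

lemma pvCount_eq (lows : List String) (m : String × String) :
    pvCount lows m = (lows.countP (fun lt => PySem.Str.isIn lt (PySem.Str.lower m.2)) : Int) := by
  unfold pvCount; rw [PySem.List.foldl_if_add_one]; omega

lemma pvCount_le (lows : List String) (m : String × String) :
    pvCount lows m ≤ (lows.length : Int) := by
  rw [pvCount_eq]; exact_mod_cast List.countP_le_length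

lemma enumerate_map {α β : Type} (f : α → β) (l : List α) (s : Int) :
    PySem.List.enumerate (l.map f) s = (PySem.List.enumerate l s).map (fun p => (p.1, f p.2)) := by
  induction l generalizing s with
  | nil => simp [PySem.List.enumerate_nil]
  | cons x t ih => simp [PySem.List.enumerate_cons, ih]

lemma pvL_append (cs : List Int) (c : Int) :
    pvL (cs ++ [c]) = if c > 0 ∧ c ≥ (pvL cs).2 then ((cs.length : Int), c) else pvL cs := by
  unfold pvL
  rw [PySem.List.enumerate_append, List.foldl_append, PySem.List.enumerate_cons,
    PySem.List.enumerate_nil, List.foldl_cons, List.foldl_nil]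
  simp

lemma pvL_snd_nonneg (cs : List Int) : 0 ≤ (pvL cs).2 := by
  induction cs using List.reverseRecOn with
  | nil => simp [pvL, PySem.List.enumerate_nil]
  | append_singleton cs c ih =>
    rw [pvL_append]
    split_ifs with h
    · exact le_of_lt h.1
    · exact ih

lemma pvL_zero (cs : List Int) (h : (pvL cs).2 ≤ 0) : (pvL cs).1 = -1 := by
  induction cs using List.reverseRecOn with
  | nil => simp [pvL, PySem.List.enumerate_nil]
  | append_singleton cs c ih =>
    rw [pvL_append] at h ⊢
    split_ifs at h ⊢ with hc
    · exact absurd h (by omega)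
    · exact ih h

lemma pvSRec_sink (l : List (Int × Int)) (st : Int × Int) (h : ∀ q ∈ l, q.2 ≤ st.2) :
    pvSRec l st = st.1 := by
  induction l generalizing st with
  | nil => rfl
  | cons q rest ih =>
    unfold pvSRec
    rw [if_neg (by have := h q (List.mem_cons_self ..); omega)]
    exact ih st (fun r hr => h r (List.mem_cons_of_mem _ hr))

lemma pvBRec_eq_pvSRec (full : Int) (l : List (Int × Int)) (st : Int × Int)
    (hl : ∀ q ∈ l, q.2 ≤ full) (hst : st.2 < full) :
    pvBRec full l st = pvSRec l st := by
  induction l generalizing st with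
  | nil => rfl
  | cons q rest ih =>
    have hq := hl q (List.mem_cons_self ..)
    have hrest : ∀ r ∈ rest, r.2 ≤ full := fun r hr => hl r (List.mem_cons_of_mem _ hr)
    unfold pvBRec pvSRec
    by_cases hfull : q.2 = full
    · rw [if_pos hfull, if_pos (by omega)]
      exact (pvSRec_sink rest q (fun r hr => by have := hrest r hr; omega)).symm
    · rw [if_neg hfull]
      by_cases hgt : q.2 > st.2
      · rw [if_pos hgt, if_pos hgt]; exact ih q hrest (by omega)
      · rw [if_neg hgt, if_neg hgt]; exact ih st hrest hst

lemma pvSRec_reverse (cs : List Int) (st : Int × Int) (hst : 0 ≤ st.2) :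
    pvSRec (PySem.List.enumerate cs).reverse st =
      if (pvL cs).2 > st.2 then (pvL cs).1 else st.1 := by
  induction cs using List.reverseRecOn generalizing st with
  | nil =>
    rw [if_neg (by have := pvL_snd_nonneg ([] : List Int); simp [pvL, PySem.List.enumerate_nil]; omega)]
    simp [PySem.List.enumerate_nil, pvSRec]
  | append_singleton cs c ih =>
    have hrev : (PySem.List.enumerate (cs ++ [c])).reverse
        = ((cs.length : Int), c) :: (PySem.List.enumerate cs).reverse := by
      rw [PySem.List.enumerate_append, PySem.List.enumerate_cons, PySem.List.enumerate_nil]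
      simp
    rw [hrev]
    have hm := pvL_snd_nonneg cs
    unfold pvSRec
    rw [pvL_append]
    by_cases hgt : c > st.2
    · rw [if_pos hgt, ih ((cs.length : Int), c) (by simp; omega)]
      by_cases h1 : c > 0 ∧ c ≥ (pvL cs).2
      · rw [if_pos h1]
        simp only
        rw [if_neg (by omega), if_pos (by omega)]
      · rw [if_neg h1]
        have hlt : c < (pvL cs).2 := by omega
        rw [if_pos (by omega), if_pos (by omega)]
    · rw [if_neg hgt, ih st hst]
      by_cases h1 : c > 0 ∧ c ≥ (pvL cs).2
      · rw [if_pos h1]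
        simp only
        rw [if_neg (by omega), if_neg (by omega)]
      · rw [if_neg h1]

lemma loopA (lows : List String) (ms : List (String × String)) :
    (PySem.List.enumerate ms).foldl
      (fun (st : Int × Int) (p : Int × (String × String)) =>
        let lower_text := PySem.Str.lower p.2.2
        let count : Int := lows.foldl
          (fun acc lt => if PySem.Str.isIn lt lower_text then acc + 1 else acc) 0
        if count > 0 ∧ count ≥ st.2 then (p.1, count) else st)
      (-1, 0)
    = pvL (ms.map (pvCount lows)) := by
  unfold pvL
  rw [enumerate_map, List.foldl_map]
  rfl

lemma loopB (lows : List String) (full : Int) (l : List (Int × (String × String))) (st : Int × Int) :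
    pvBLoop lows full l st = pvBRec full (l.map (fun p => (p.1, pvCount lows p.2))) st := by
  induction l generalizing st with
  | nil => rfl
  | cons p rest ih =>
    unfold pvBLoop pvBRec
    simp only [List.map_cons]
    have hc : (lows.foldl (fun acc lt => if PySem.Str.isIn lt (PySem.Str.lower p.2.2) then acc + 1 else acc) 0) = pvCount lows p.2 := rfl
    rw [hc]
    by_cases h1 : pvCount lows p.2 = full
    · rw [if_pos h1, if_pos h1]
    · rw [if_neg h1, if_neg h1]
      by_cases h2 : pvCount lows p.2 > st.2
      · rw [if_pos h2, if_pos h2, ih]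
      · rw [if_neg h2, if_neg h2, ih]

-- ===== VERDICT (by name: the statement is the Claim_ definition above) =====
theorem find_best_message_match_py_spec : Claim_equal_find_best_message_match_py := by
  intro messages tokens _
  unfold Spec_find_best_message_match_py
  by_cases ht : tokens = []
  · simp [find_best_message_match_py, find_best_message_match_py_alt, ht]
  · have hlen : 0 < tokens.length := List.length_pos_iff.mpr ht
    have hfull : (1 : Int) ≤ ((tokens.map PySem.Str.lower).length : Int) := by
      simp only [List.length_map]; omega
    simp only [find_best_message_match_py, find_best_message_match_py_alt, if_neg ht]
    rw [loopA (tokens.map PySem.Str.lower) messages,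
      loopB, List.map_reverse, ← enumerate_map (pvCount (tokens.map PySem.Str.lower)) messages 0]
    have hle : ∀ q ∈ (PySem.List.enumerate (messages.map (pvCount (tokens.map PySem.Str.lower)))).reverse,
        q.2 ≤ ((tokens.map PySem.Str.lower).length : Int) := by
      intro q hq
      rw [List.mem_reverse, PySem.List.mem_enumerate_iff] at hq
      obtain ⟨k, hk, rfl⟩ := hq
      have hmem : (messages.map (pvCount (tokens.map PySem.Str.lower)))[k] ∈
          messages.map (pvCount (tokens.map PySem.Str.lower)) := List.getElem_mem hk
      obtain ⟨m, _, he⟩ := List.mem_map.mp hmem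
      rw [← he]
      exact pvCount_le _ m
    rw [pvBRec_eq_pvSRec _ _ _ hle (by show (0 : Int) < _; omega)]
    rw [pvSRec_reverse _ (-1, 0) (by show (0 : Int) ≤ 0; omega)]
    by_cases hz : (pvL (messages.map (pvCount (tokens.map PySem.Str.lower)))).2 > 0
    · rw [if_pos hz]
    · rw [if_neg hz]
      exact pvL_zero _ (by omega)
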